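-- pv_equiv track=rewrite | github.com/miliar/Code_Jam_Webscraper | solutions_python/solutions_year15_round0_nr3/978.py | find
-- ===== SOURCE A (Python) =====
-- table = {
--     '1': {
--         '1': {'value': '1', 'neg_flag': 1},
--         'i': {'value': 'i', 'neg_flag': 1},
--         'j': {'value': 'j', 'neg_flag': 1},
--         'k': {'value': 'k', 'neg_flag': 1},
--     },
--     'i': {
--         '1': {'value': 'i', 'neg_flag': 1},
--         'i': {'value': '1', 'neg_flag': -1},
--         'j': {'value': 'k', 'neg_flag': 1},
--         'k': {'value': 'j', 'neg_flag': -1},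
--     },
--     'j': {
--         '1': {'value': 'j', 'neg_flag': 1},
--         'i': {'value': 'k', 'neg_flag': -1},
--         'j': {'value': '1', 'neg_flag': -1},
--         'k': {'value': 'i', 'neg_flag': 1},
--     },
--     'k': {
--         '1': {'value': 'k', 'neg_flag': 1},
--         'i': {'value': 'j', 'neg_flag': 1},
--         'j': {'value': 'i', 'neg_flag': -1},
--         'k': {'value': '1', 'neg_flag': -1},
--     }
-- }
--
-- def find(ijk, find_letter):
--     neg_flag = 1
--     current_letter = '1'
--     for i, letter in enumerate(ijk):
--         result = table[current_letter][letter]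
--         current_letter = result['value']
--         neg_flag *= result['neg_flag']
--         if current_letter == find_letter:
--             return i, neg_flag
--     return None
-- ===== SOURCE B (Python) =====
-- UNITS = {'1': (1, 0, 0, 0), 'i': (0, 1, 0, 0), 'j': (0, 0, 1, 0), 'k': (0, 0, 0, 1)}
--
--
-- def _decode(w, x, y, z):
--     # exactly one component of a unit quaternion (times +-1) is nonzero
--     if w:
--         return '1', w
--     if x:
--         return 'i', x
--     if y:
--         return 'j', y
--     return 'k', z
--
--
-- def find(ijk, find_letter):
--     w, x, y, z = 1, 0, 0, 0
--     for i, ch in enumerate(ijk):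
--         a, b, c, d = UNITS[ch]
--         w, x, y, z = (w * a - x * b - y * c - z * d,
--                       w * b + x * a + y * d - z * c,
--                       w * c - x * d + y * a + z * b,
--                       w * d + x * c - y * b + z * a)
--         letter, sign = _decode(w, x, y, z)
--         if letter == find_letter:
--             return i, sign
--     return None
-- ===== Notes on version B (the rewrite author's own statement) =====
-- stated objective: alternative
-- what changed: The running product is kept as a 4-tuple of integer quaternion coefficients combined with the full Hamilton product formula and decoded to (letter, sign) per step, instead of A's nested multiplication-table dict carrying (current_letter, neg_flag).
-- outside the precondition, e.g. on find('ix', 'i'): A returns (0, 1), B returns (0, 1)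
import Mathlib
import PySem

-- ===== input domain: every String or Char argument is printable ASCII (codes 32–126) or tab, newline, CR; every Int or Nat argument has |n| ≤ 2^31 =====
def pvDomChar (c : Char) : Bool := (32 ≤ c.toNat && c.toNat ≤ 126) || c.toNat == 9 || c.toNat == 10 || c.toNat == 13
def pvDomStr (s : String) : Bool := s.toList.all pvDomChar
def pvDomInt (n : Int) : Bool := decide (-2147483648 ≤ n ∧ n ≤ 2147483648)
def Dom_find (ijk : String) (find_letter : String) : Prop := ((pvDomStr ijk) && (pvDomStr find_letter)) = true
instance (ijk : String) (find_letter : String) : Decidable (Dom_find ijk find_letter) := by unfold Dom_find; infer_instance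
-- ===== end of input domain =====

-- B replaces A's nested multiplication-table dict by a running quaternion held as four
-- integer coefficients combined with the Hamilton product formula (objective: alternative).

-- ===== PORT A =====
-- A's nested dict table[cur][letter]: first-match lookup, none = KeyError
def tableA (cur : Char) (letter : Char) : Option (Char × Int) :=
  if cur = '1' then
    if letter = '1' then some ('1', 1) else if letter = 'i' then some ('i', 1)
    else if letter = 'j' then some ('j', 1) else if letter = 'k' then some ('k', 1) else none
  else if cur = 'i' then
    if letter = '1' then some ('i', 1) else if letter = 'i' then some ('1', -1)
    else if letter = 'j' then some ('k', 1) else if letter = 'k' then some ('j', -1) else none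
  else if cur = 'j' then
    if letter = '1' then some ('j', 1) else if letter = 'i' then some ('k', -1)
    else if letter = 'j' then some ('1', -1) else if letter = 'k' then some ('i', 1) else none
  else if cur = 'k' then
    if letter = '1' then some ('k', 1) else if letter = 'i' then some ('j', 1)
    else if letter = 'j' then some ('i', -1) else if letter = 'k' then some ('1', -1) else none
  else none

-- the for-loop of A: state (current_letter, neg_flag), index i; none also stands for the
-- KeyError on a letter outside {1,i,j,k} (excluded by Pre_find)
def findLoopA (find_letter : String) (chars : List Char) (i : Int)
    (cur : Char) (neg : Int) : Option (Int × Int) :=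
  match chars with
  | [] => none
  | letter :: rest =>
    match tableA cur letter with
    | none => none
    | some (v, n) =>
      let neg' := neg * n
      if String.mk [v] = find_letter then some (i, neg')
      else findLoopA find_letter rest (i + 1) v neg'

def find (ijk : String) (find_letter : String) : Option (Int × Int) :=
  findLoopA find_letter ijk.toList 0 '1' 1

-- ===== PORT B =====
-- UNITS[ch]; none = KeyError (excluded by Pre_find)
def unitOf (ch : Char) : Option (Int × Int × Int × Int) :=
  if ch = '1' then some (1, 0, 0, 0)
  else if ch = 'i' then some (0, 1, 0, 0)
  else if ch = 'j' then some (0, 0, 1, 0)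
  else if ch = 'k' then some (0, 0, 0, 1)
  else none

def decodeQ (w x y z : Int) : String × Int :=
  if w ≠ 0 then ("1", w)
  else if x ≠ 0 then ("i", x)
  else if y ≠ 0 then ("j", y)
  else ("k", z)

def findLoopB (find_letter : String) (chars : List Char) (i : Int)
    (w x y z : Int) : Option (Int × Int) :=
  match chars with
  | [] => none
  | ch :: rest =>
    match unitOf ch with
    | none => none
    | some (a, b, c, d) =>
      let w' := w * a - x * b - y * c - z * d
      let x' := w * b + x * a + y * d - z * c
      let y' := w * c - x * d + y * a + z * b
      let z' := w * d + x * c - y * b + z * a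
      let p := decodeQ w' x' y' z'
      if p.1 = find_letter then some (i, p.2)
      else findLoopB find_letter rest (i + 1) w' x' y' z'

def find_alt (ijk : String) (find_letter : String) : Option (Int × Int) :=
  findLoopB find_letter ijk.toList 0 1 0 0 0

-- ===== PRECONDITION & SPEC =====
-- Pre_ excludes strings containing a character outside {'1','i','j','k'}: there A (and B)
-- raises KeyError, except when the sought letter is matched before the first bad character,
-- where both return the same value (excluded only to keep the condition closed-form).
def Pre_find (ijk : String) (find_letter : String) : Prop :=
  (ijk.toList.all fun c => c == '1' || c == 'i' || c == 'j' || c == 'k') = true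

instance (ijk : String) (find_letter : String) : Decidable (Pre_find ijk find_letter) := by
  unfold Pre_find; infer_instance

def pvWitness_find : String × String := ("ij", "k")

def Spec_find (ijk : String) (find_letter : String) (out : Option (Int × Int)) : Prop :=
  out = find_alt ijk find_letter

instance (ijk : String) (find_letter : String) (out : Option (Int × Int)) :
    Decidable (Spec_find ijk find_letter out) := by unfold Spec_find; infer_instance

-- ===== CLAIM =====
def Claim_equal_find : Prop :=
  ∀ (ijk : String) (find_letter : String), Dom_find ijk find_letter →
    Pre_find ijk find_letter → Spec_find ijk find_letter (find ijk find_letter)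

-- ===== LEMMAS AND PROOFS =====
-- B's quaternion state corresponding to A's (cur, neg)
def stateOf (cur : Char) (neg : Int) : Int × Int × Int × Int :=
  if cur = '1' then (neg, 0, 0, 0)
  else if cur = 'i' then (0, neg, 0, 0)
  else if cur = 'j' then (0, 0, neg, 0)
  else (0, 0, 0, neg)

theorem loop_agree (find_letter : String) (chars : List Char)
    (hc : ∀ c ∈ chars, c = '1' ∨ c = 'i' ∨ c = 'j' ∨ c = 'k') :
    ∀ (i : Int) (cur : Char) (neg : Int),
      (cur = '1' ∨ cur = 'i' ∨ cur = 'j' ∨ cur = 'k') → neg ≠ 0 →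
      findLoopA find_letter chars i cur neg =
        findLoopB find_letter chars i (stateOf cur neg).1 (stateOf cur neg).2.1
          (stateOf cur neg).2.2.1 (stateOf cur neg).2.2.2 := by
  induction chars with
  | nil => intro i cur neg _ _; rfl
  | cons l rest ih =>
    intro i cur neg hcur hneg
    have hl := hc l (List.mem_cons_self ..)
    have hrest : ∀ c ∈ rest, c = '1' ∨ c = 'i' ∨ c = 'j' ∨ c = 'k' :=
      fun c hm => hc c (List.mem_cons_of_mem _ hm)
    rcases hcur with h1 | h1 | h1 | h1 <;> rcases hl with h2 | h2 | h2 | h2 <;>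
      subst h1 <;> subst h2 <;>
      simp only [findLoopA, findLoopB, tableA, unitOf, stateOf, decodeQ,
        if_pos, if_neg, reduceCtorEq, mul_one, mul_zero, mul_neg, one_mul,
        zero_mul, neg_zero, add_zero, zero_add, sub_zero, zero_sub, sub_self,
        neg_neg, reduceIte, Char.reduceEq] <;>
      simp only [hneg, if_neg, if_pos, ne_eq, neg_eq_zero, not_true_eq_false,
        not_false_eq_true, reduceIte] <;>
      simp only [show (String.mk ['1'] : String) = "1" from rfl,
        show (String.mk ['i'] : String) = "i" from rfl,
        show (String.mk ['j'] : String) = "j" from rfl,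
        show (String.mk ['k'] : String) = "k" from rfl] <;>
      first
        | rfl
        | (split <;>
            first
            | rfl
            | (rw [ih hrest _ _ _ (by tauto) (by simpa using hneg)] ;
               simp [stateOf, mul_one, mul_neg]))
  termination_by chars.length

-- ===== VERDICT =====
theorem find_spec : Claim_equal_find := by
  intro ijk find_letter _ hpre
  unfold Spec_find find find_alt
  have hc : ∀ c ∈ ijk.toList, c = '1' ∨ c = 'i' ∨ c = 'j' ∨ c = 'k' := by
    intro c hm
    have h := List.all_eq_true.mp hpre c hm
    simp at h; tauto
  have := loop_agree find_letter ijk.toList hc 0 '1' 1 (by tauto) one_ne_zero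
  simpa [stateOf] using this
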